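-- pv_equiv track=rewrite | github.com/wlaszkiewicz/center-star-msa | core/statistics.py | _count_fully_conserved_columns
-- ===== SOURCE A (Python) =====
-- def _count_fully_conserved_columns(aligned_sequences: list[str]) -> int:
--     num_seqs = len(aligned_sequences)
--     aln_len = len(aligned_sequences[0])
--     fully_conserved_cols = 0
--     for j in range(aln_len):
--         first_char_in_col = None
--         is_conserved_this_col = True
--         has_any_nongap_char = False
--         for i in range(num_seqs):
--             char_ij = aligned_sequences[i][j]
--             if char_ij != '-':
--                 has_any_nongap_char = True
--                 if first_char_in_col is None:
--                     first_char_in_col = char_ij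
--                 elif first_char_in_col != char_ij:
--                     is_conserved_this_col = False
--                     break
--         if is_conserved_this_col and has_any_nongap_char:
--             fully_conserved_cols += 1
--     return fully_conserved_cols
-- ===== SOURCE B (Python) =====
-- def _count_fully_conserved_columns(aligned_sequences: list[str]) -> int:
--     aln_len = len(aligned_sequences[0])
--     residues = [set() for _ in range(aln_len)]
--     for seq in aligned_sequences:
--         residues = [r if seq[j] == '-' else r | {seq[j]} for j, r in enumerate(residues)]
--     return sum(1 for r in residues if len(r) == 1)
-- ===== Notes on version B (the rewrite author's own statement) =====
-- stated objective: alternative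
-- what changed: Replaces A's column-major scan with scalar state and early break by a row-major staged pass: one traversal over the sequences maintaining an array of per-column residue sets, then a second pass counting columns whose residue set has exactly one element.
-- outside the precondition, e.g. on _count_fully_conserved_columns(['AB', 'CD', 'X']): A returns 0, B raises IndexError
import Mathlib
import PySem

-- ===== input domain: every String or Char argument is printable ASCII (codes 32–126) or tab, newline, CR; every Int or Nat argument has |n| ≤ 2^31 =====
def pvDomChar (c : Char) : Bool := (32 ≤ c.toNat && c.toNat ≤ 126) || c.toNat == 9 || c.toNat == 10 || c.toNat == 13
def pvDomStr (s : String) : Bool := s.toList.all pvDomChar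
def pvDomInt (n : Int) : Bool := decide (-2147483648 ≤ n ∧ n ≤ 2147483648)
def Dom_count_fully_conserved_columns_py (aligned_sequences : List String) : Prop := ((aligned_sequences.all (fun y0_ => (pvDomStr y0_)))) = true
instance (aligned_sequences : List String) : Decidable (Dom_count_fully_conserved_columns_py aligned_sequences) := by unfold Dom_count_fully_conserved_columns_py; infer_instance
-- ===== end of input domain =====

-- B replaces A's column-major scan (first-char tracker, conserved flag, early break) by a
-- row-major staged pass: an array of per-column residue sets built over the rows, then a
-- count of columns whose residue set has exactly one element (alternative decomposition).


-- ===== PORT A =====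
-- inner 'for i in range(num_seqs)' loop of A, with its early break (returning (is_conserved, has_any));
-- the cell aligned_sequences[i][j] is read with pyGet? (exact); the .getD fallback is only reached outside Pre_.
def pvAInner (j : Int) (seqs : List String) (first : Option Char) (hasAny : Bool) : Bool × Bool :=
  match seqs with
  | [] => (true, hasAny)
  | s :: rest =>
    let c := (PySem.List.pyGet? s.toList j).getD ' '
    if c ≠ '-' then
      match first with
      | none => pvAInner j rest (some c) true
      | some f => if f ≠ c then (false, true) else pvAInner j rest first true
    else pvAInner j rest first hasAny

def count_fully_conserved_columns_py (aligned_sequences : List String) : Int :=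
  let aln_len := ((aligned_sequences[0]?).getD "").toList.length
  (List.range aln_len).foldl
    (fun acc (j : Nat) =>
      if (pvAInner (j : Int) aligned_sequences none false).1
         && (pvAInner (j : Int) aligned_sequences none false).2
      then acc + 1 else acc) 0

-- ===== PORT B =====
-- one row of B's loop: 'residues = [r if seq[j] == '-' else r | {seq[j]} for j, r in enumerate(residues)]';
-- the cell seq[j] is read with pyGet? (exact); the .getD fallback is only reached outside Pre_.
def pvRowStep (residues : List (PySem.Set Char)) (seq : String) : List (PySem.Set Char) :=
  (PySem.List.enumerate residues).map (fun jr =>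
    let c := (PySem.List.pyGet? seq.toList jr.1).getD '?'
    if c = '-' then jr.2 else PySem.Set.add jr.2 c)

def count_fully_conserved_columns_py_alt (aligned_sequences : List String) : Int :=
  let aln_len := ((aligned_sequences[0]?).getD "").toList.length
  let residues := aligned_sequences.foldl pvRowStep (List.replicate aln_len PySem.Set.empty)
  residues.foldl (fun acc r => if PySem.Set.len r = 1 then acc + 1 else acc) 0

-- ===== PRECONDITION & SPEC =====
-- Pre_ excludes the empty list and ragged inputs where some sequence is shorter than the first:
-- A raises IndexError there, except when an early break in every affected column accidentally
-- skips the short sequence; B reads every cell and raises on all such inputs.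
def Pre_count_fully_conserved_columns_py (aligned_sequences : List String) : Prop :=
  aligned_sequences ≠ [] ∧
  ∀ s ∈ aligned_sequences, ((aligned_sequences.headD "").toList.length ≤ s.toList.length)
instance (aligned_sequences : List String) : Decidable (Pre_count_fully_conserved_columns_py aligned_sequences) := by unfold Pre_count_fully_conserved_columns_py; infer_instance

def pvWitness_count_fully_conserved_columns_py : List String := ["AB-", "A--"]

def Spec_count_fully_conserved_columns_py (aligned_sequences : List String) (out : Int) : Prop := out = count_fully_conserved_columns_py_alt aligned_sequences
instance (aligned_sequences : List String) (out : Int) : Decidable (Spec_count_fully_conserved_columns_py aligned_sequences out) := by unfold Spec_count_fully_conserved_columns_py; infer_instance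

-- ===== CLAIM (what is proved, stated in full; the proofs are below) =====
def Claim_equal_count_fully_conserved_columns_py : Prop := ∀ (aligned_sequences : List String), Dom_count_fully_conserved_columns_py aligned_sequences → Pre_count_fully_conserved_columns_py aligned_sequences → Spec_count_fully_conserved_columns_py aligned_sequences (count_fully_conserved_columns_py aligned_sequences)

-- ===== LEMMAS AND PROOFS =====

-- the characters of column j, in sequence order
def pvCol (d : Char) (seqs : List String) (j : Int) : List Char :=
  seqs.map (fun s => (PySem.List.pyGet? s.toList j).getD d)

-- boolean spec of one column: the non-gap characters are nonempty and all equal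
def pvColOK (cs : List Char) : Bool :=
  match cs.filter (fun x => x != '-') with
  | [] => false
  | c :: rest => rest.all (fun x => x == c)

lemma pvAInner_some (j : Int) (f : Char) (seqs : List String) :
    pvAInner j seqs (some f) true
      = ((pvCol ' ' seqs j).all (fun x => x == '-' || x == f), true) := by
  induction seqs with
  | nil => simp [pvAInner, pvCol]
  | cons s rest ih =>
    have step : pvAInner j (s :: rest) (some f) true =
        (if ((PySem.List.pyGet? s.toList j).getD ' ') ≠ '-' then
           (if f ≠ ((PySem.List.pyGet? s.toList j).getD ' ') then (false, true)
            else pvAInner j rest (some f) true)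
         else pvAInner j rest (some f) true) := rfl
    have hcol : pvCol ' ' (s :: rest) j
        = ((PySem.List.pyGet? s.toList j).getD ' ') :: pvCol ' ' rest j := rfl
    rw [step, hcol, List.all_cons]
    generalize ((PySem.List.pyGet? s.toList j).getD ' ') = c
    by_cases h : c = '-'
    · rw [if_neg (by simp [h]), ih]
      simp [h]
    · rw [if_pos h]
      by_cases h2 : f = c
      · rw [if_neg (by simp [h2]), ih]
        simp [h2]
      · rw [if_pos h2]
        have hcf : (c == f) = false := by
          simp only [beq_eq_false_iff_ne, ne_eq]
          exact fun e => h2 e.symm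
        simp [h, hcf]

lemma pvAInner_none (j : Int) (seqs : List String) :
    ((pvAInner j seqs none false).1 && (pvAInner j seqs none false).2)
      = pvColOK (pvCol ' ' seqs j) := by
  induction seqs with
  | nil => simp [pvAInner, pvCol, pvColOK]
  | cons s rest ih =>
    have step : pvAInner j (s :: rest) none false =
        (if ((PySem.List.pyGet? s.toList j).getD ' ') ≠ '-' then
           pvAInner j rest (some ((PySem.List.pyGet? s.toList j).getD ' ')) true
         else pvAInner j rest none false) := rfl
    have hcol : pvCol ' ' (s :: rest) j
        = ((PySem.List.pyGet? s.toList j).getD ' ') :: pvCol ' ' rest j := rfl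
    rw [step, hcol]
    generalize ((PySem.List.pyGet? s.toList j).getD ' ') = c
    by_cases h : c = '-'
    · rw [if_neg (by simp [h])]
      have hok : pvColOK (c :: pvCol ' ' rest j) = pvColOK (pvCol ' ' rest j) := by
        simp [pvColOK, h]
      rw [hok]
      exact ih
    · rw [if_pos h, pvAInner_some]
      simp only [Bool.and_true]
      have hok : pvColOK (c :: pvCol ' ' rest j)
          = (List.filter (fun x => x != '-') (pvCol ' ' rest j)).all (fun x => x == c) := by
        simp [pvColOK, h]
      rw [hok, List.all_filter]
      have hfun : (fun a => !(a != '-') || (a == c)) = (fun x => x == '-' || x == c) := by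
        funext x
        simp [bne]
      rw [hfun]

-- a nodup list with a member to which all members are equal has length 1
lemma pvNodupLen (l : List Char) (a : Char) (hnd : l.Nodup) (hm : a ∈ l)
    (hall : ∀ x ∈ l, x = a) : l.length = 1 := by
  have hrep : l = List.replicate l.length a := List.eq_replicate_of_mem hall
  have h1 : l.length ≤ 1 := by
    by_contra hgt
    rw [hrep, List.nodup_replicate] at hnd
    omega
  have h0 : 0 < l.length := List.length_pos_of_mem hm
  omega

-- the set of non-gap characters of a column has exactly one element iff the column is conserved
lemma pvSetSide (cs : List Char) :
    (PySem.Set.len (PySem.Set.ofList (cs.filter (fun x => x != '-'))) = 1)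
      ↔ pvColOK cs = true := by
  set D := PySem.Set.ofList (cs.filter (fun x => x != '-')) with hD
  have hmemD : ∀ x, x ∈ D ↔ x ∈ cs ∧ x ≠ '-' := by
    intro x
    rw [hD, PySem.Set.mem_ofList, List.mem_filter]
    simp
  have hnd : D.Nodup := PySem.Set.nodup_ofList _
  have hlen : PySem.Set.len D = (D.length : Int) := rfl
  constructor
  · intro h1
    rw [hlen] at h1
    have hl1 : D.length = 1 := by exact_mod_cast h1
    obtain ⟨a, ha⟩ := List.length_eq_one_iff.mp hl1
    have haD : a ∈ cs ∧ a ≠ '-' := (hmemD a).mp (by simp [ha])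
    unfold pvColOK
    have hgs : a ∈ cs.filter (fun x => x != '-') := by
      simp [List.mem_filter, haD.1, haD.2]
    rcases hgseq : cs.filter (fun x => x != '-') with _ | ⟨c, rest⟩
    · rw [hgseq] at hgs; simp at hgs
    · have hc : c ∈ cs ∧ c ≠ '-' := by
        have : c ∈ cs.filter (fun x => x != '-') := by rw [hgseq]; simp
        simpa [List.mem_filter] using this
      refine List.all_eq_true.mpr (fun x hx => ?_)
      have hxg : x ∈ cs.filter (fun y => y != '-') := by
        rw [hgseq]; exact List.mem_cons_of_mem _ hx
      have hxcs : x ∈ cs ∧ x ≠ '-' := by simpa [List.mem_filter] using hxg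
      have hxa : x = a := by
        have : x ∈ D := (hmemD x).mpr hxcs
        rw [ha] at this; simpa using this
      have hca : c = a := by
        have : c ∈ D := (hmemD c).mpr hc
        rw [ha] at this; simpa using this
      simp [hxa, hca]
  · intro hok
    unfold pvColOK at hok
    rcases hgseq : cs.filter (fun x => x != '-') with _ | ⟨c, rest⟩
    · rw [hgseq] at hok; simp at hok
    · rw [hgseq] at hok
      have hc : c ∈ cs ∧ c ≠ '-' := by
        have : c ∈ cs.filter (fun x => x != '-') := by rw [hgseq]; simp
        simpa [List.mem_filter] using this
      have hallD : ∀ x ∈ D, x = c := by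
        intro x hx
        have hxcs := (hmemD x).mp hx
        have hxg : x ∈ cs.filter (fun y => y != '-') := by
          simp [List.mem_filter, hxcs.1, hxcs.2]
        rw [hgseq] at hxg
        rcases List.mem_cons.mp hxg with hh | hh
        · exact hh
        · simpa using List.all_eq_true.mp hok x hh
      have hcD : c ∈ D := (hmemD c).mpr hc
      rw [hlen, pvNodupLen D c hnd hcD hallD]
      rfl

-- the per-column fold B effectively performs on column j
def pvColFold (seqs : List String) (j : Int) (r0 : PySem.Set Char) : PySem.Set Char :=
  seqs.foldl (fun r s =>
    let c := (PySem.List.pyGet? s.toList j).getD '?'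
    if c = '-' then r else PySem.Set.add r c) r0

lemma pvRowStep_getElem? (res : List (PySem.Set Char)) (s : String) (j : Nat) :
    (pvRowStep res s)[j]? = res[j]?.map (fun r =>
      let c := (PySem.List.pyGet? s.toList (j : Int)).getD '?'
      if c = '-' then r else PySem.Set.add r c) := by
  cases h : res[j]? <;> simp [pvRowStep, PySem.List.getElem?_enumerate, h]

-- pointwise characterisation of B's row fold: entry j is the column-j fold
lemma pvRows_getElem? (seqs : List String) (res : List (PySem.Set Char)) (j : Nat) :
    (seqs.foldl pvRowStep res)[j]? = res[j]?.map (fun r => pvColFold seqs (j : Int) r) := by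
  induction seqs generalizing res with
  | nil => cases h : res[j]? <;> simp [pvColFold, h]
  | cons s rest ih =>
    rw [List.foldl_cons, ih, pvRowStep_getElem?]
    cases res[j]? <;> simp [pvColFold]

-- starting from the empty set, the column fold builds the set of non-gap characters of the column
lemma pvColFold_eq_ofList (seqs : List String) (j : Int) :
    pvColFold seqs j PySem.Set.empty
      = PySem.Set.ofList ((pvCol '?' seqs j).filter (fun x => x != '-')) := by
  rw [PySem.Set.ofList_eq_foldl]
  show pvColFold seqs j [] = _
  have key : ∀ r0 : PySem.Set Char, pvColFold seqs j r0
      = ((pvCol '?' seqs j).filter (fun x => x != '-')).foldl PySem.Set.add r0 := by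
    induction seqs with
    | nil => intro r0; rfl
    | cons s rest ih =>
      intro r0
      have hstep : pvColFold (s :: rest) j r0
          = pvColFold rest j (if ((PySem.List.pyGet? s.toList j).getD '?') = '-' then r0
              else PySem.Set.add r0 ((PySem.List.pyGet? s.toList j).getD '?')) := rfl
      have hcol : pvCol '?' (s :: rest) j
          = ((PySem.List.pyGet? s.toList j).getD '?') :: pvCol '?' rest j := rfl
      rw [hstep, hcol]
      generalize ((PySem.List.pyGet? s.toList j).getD '?') = c
      by_cases h : c = '-'
      · simp [h, ih]
      · simp [h, ih]
  exact key []

-- B's residue list equals the list of per-column sets, indexed by range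
lemma pvResidues_eq (seqs : List String) (n : Nat) :
    seqs.foldl pvRowStep (List.replicate n PySem.Set.empty)
      = (List.range n).map (fun (j : Nat) =>
          PySem.Set.ofList ((pvCol '?' seqs ((j : Nat) : Int)).filter (fun x => x != '-'))) := by
  apply List.ext_getElem?
  intro j
  rw [pvRows_getElem?]
  by_cases hj : j < n
  · simp [hj]
    exact pvColFold_eq_ofList seqs (j : Int)
  · simp [hj]

-- inside Pre_ (every cell of column n exists) the fallback character is never read
lemma pvColD (xs : List String) (n : Nat) (h : ∀ s ∈ xs, n < s.toList.length)
    (d₁ d₂ : Char) : pvCol d₁ xs (n : Int) = pvCol d₂ xs (n : Int) := by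
  refine List.map_congr_left (fun s hs => ?_)
  have : PySem.List.pyGet? s.toList (n : Int) = s.toList[n]? := by
    simp [PySem.List.pyGet?_natCast]
  rw [this, List.getElem?_eq_getElem (h s hs)]
  rfl

-- the two per-column step functions agree on a fully present column
lemma pvStep (xs : List String) (n : Nat) (acc : Int)
    (hin : ∀ s ∈ xs, n < s.toList.length) :
    (if (pvAInner (n : Int) xs none false).1 && (pvAInner (n : Int) xs none false).2
     then acc + 1 else acc)
      = (if PySem.Set.len (PySem.Set.ofList ((pvCol '?' xs (n : Int)).filter (fun x => x != '-'))) = 1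
         then acc + 1 else acc) := by
  rw [pvColD xs n hin '?' ' ']
  by_cases h : pvColOK (pvCol ' ' xs (n : Int)) = true
  · rw [if_pos, if_pos ((pvSetSide (pvCol ' ' xs (n : Int))).mpr h)]
    rw [pvAInner_none]; exact h
  · rw [if_neg, if_neg (fun hh => h ((pvSetSide (pvCol ' ' xs (n : Int))).mp hh))]
    rw [pvAInner_none]
    simpa using h

lemma pvFold (xs : List String) (l : List Nat)
    (hin : ∀ j ∈ l, ∀ s ∈ xs, j < s.toList.length) (acc : Int) :
    List.foldl (fun (acc : Int) (j : Nat) =>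
        if (pvAInner (j : Int) xs none false).1 && (pvAInner (j : Int) xs none false).2
        then acc + 1 else acc) acc l
      = List.foldl (fun (acc : Int) (r : PySem.Set Char) =>
          if PySem.Set.len r = 1 then acc + 1 else acc) acc
          (l.map (fun (j : Nat) =>
            PySem.Set.ofList ((pvCol '?' xs ((j : Nat) : Int)).filter (fun x => x != '-')))) := by
  induction l generalizing acc with
  | nil => rfl
  | cons j rest ih =>
    rw [List.map_cons, List.foldl_cons, List.foldl_cons,
        pvStep xs j acc (hin j (List.mem_cons_self))]
    exact ih (fun k hk s hs => hin k (List.mem_cons_of_mem _ hk) s hs) _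

-- ===== VERDICT (by name: the statement is the Claim_ definition above) =====
theorem count_fully_conserved_columns_py_spec : Claim_equal_count_fully_conserved_columns_py := by
  intro xs _ hpre
  unfold Spec_count_fully_conserved_columns_py
  unfold count_fully_conserved_columns_py count_fully_conserved_columns_py_alt
  simp only
  rw [pvResidues_eq]
  refine pvFold xs (List.range ((xs[0]?).getD "").toList.length) (fun j hj s hs => ?_) 0
  rcases xs with _ | ⟨x0, rest⟩
  · exact absurd rfl hpre.1
  · have hlen : ((x0 :: rest)[0]?.getD "").toList.length ≤ s.toList.length := by
      simpa using hpre.2 s hs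
    exact lt_of_lt_of_le (List.mem_range.mp hj) hlen
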